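-- pv_equiv track=rewrite | github.com/dicer0/p_Python_ESP | a1.-Data Science/24.1.-Ejercicios Estructuras de Datos.py | StringChallenge_Reverse
-- ===== SOURCE A (Python) =====
-- def StringChallenge_Reverse(strParam):
--     challenge_token = "c2xu739"
--
--     # Step 1: reverse the string
--     reversed_str = strParam[::-1]
--
--     # Step 2: concatenate the challenge token
--     combined = reversed_str + challenge_token
--
--     # Step 3: replace every 3rd character with 'X'
--     final_output = ""
--     for i, ch in enumerate(combined, start=1):
--         if i % 3 == 0:
--             final_output += "X"
--         else:
--             final_output += ch
--
--     return final_output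
-- ===== SOURCE B (Python) =====
-- def StringChallenge_Reverse(strParam):
--     combined = strParam[::-1] + "c2xu739"
--     chars = list(combined)
--     for i in range(2, len(chars), 3):
--         chars[i] = "X"
--     return "".join(chars)
-- ===== Notes on version B (the rewrite author's own statement) =====
-- stated objective: faster
-- what changed: Replaces the enumerate-with-modulo-branch loop that rebuilds the string by repeated concatenation with a strided index loop (range(2, len, 3)) that overwrites only every 3rd slot of a mutable char list, then joins once.
import Mathlib
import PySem

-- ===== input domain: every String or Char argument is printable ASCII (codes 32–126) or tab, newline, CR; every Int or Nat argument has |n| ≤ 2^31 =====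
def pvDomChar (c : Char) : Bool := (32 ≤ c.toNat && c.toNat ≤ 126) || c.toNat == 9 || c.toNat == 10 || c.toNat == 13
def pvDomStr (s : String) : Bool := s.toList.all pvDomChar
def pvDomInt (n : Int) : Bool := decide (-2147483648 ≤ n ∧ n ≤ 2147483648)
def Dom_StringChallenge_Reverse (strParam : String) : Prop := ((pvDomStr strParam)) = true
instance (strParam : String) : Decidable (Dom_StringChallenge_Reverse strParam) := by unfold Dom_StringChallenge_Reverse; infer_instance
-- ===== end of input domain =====

-- B replaces A's enumerate-with-modulo-branch rebuild by a strided index loop that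
-- overwrites every 3rd slot of the char list (idiomatic; same asymptotics).

-- ===== PORT A =====
-- literal port: reversed_str = strParam[::-1]; combined = reversed_str + token;
-- then fold over enumerate(combined, start=1) appending 'X' or the char.
def StringChallenge_Reverse (strParam : String) : String :=
  let token : List Char := "c2xu739".toList
  let reversedStr : List Char := strParam.toList.reverse
  let combined : List Char := reversedStr ++ token
  let finalOutput : List Char :=
    (PySem.List.enumerate combined 1).foldl
      (fun acc p => if PySem.Int.mod p.1 3 = 0 then acc ++ ['X'] else acc ++ [p.2]) []
  String.ofList finalOutput

-- ===== PORT B =====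
-- literal port of Source B: chars = list(combined); for i in range(2, len(chars), 3): chars[i] = 'X'
def StringChallenge_Reverse_alt (strParam : String) : String :=
  let combined : List Char := strParam.toList.reverse ++ "c2xu739".toList
  let chars : List Char :=
    (PySem.List.pyRange 2 (PySem.List.len combined) 3).foldl
      (fun acc i => PySem.List.pySetD acc i 'X') combined
  String.ofList chars

-- ===== PRECONDITION & SPEC =====
def Spec_StringChallenge_Reverse (strParam : String) (out : String) : Prop := out = StringChallenge_Reverse_alt strParam
instance (strParam : String) (out : String) : Decidable (Spec_StringChallenge_Reverse strParam out) := by unfold Spec_StringChallenge_Reverse; infer_instance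

-- ===== CLAIM (what is proved, stated in full; the proofs are below) =====
def Claim_equal_StringChallenge_Reverse : Prop := ∀ (strParam : String), Dom_StringChallenge_Reverse strParam → Spec_StringChallenge_Reverse strParam (StringChallenge_Reverse strParam)

-- ===== LEMMAS AND PROOFS =====

-- the fold of pySetD preserves length
lemma length_foldl_pySetD (r : List Int) (l : List Char) :
    ((r.foldl (fun acc i => PySem.List.pySetD acc i 'X') l)).length = l.length := by
  induction r generalizing l with
  | nil => rfl
  | cons i r ih => simp [List.foldl_cons, ih, PySem.List.length_pySetD]

-- pointwise value of the pySetD fold, for nonnegative indices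
lemma getElem_foldl_pySetD (r : List Int) (hr : ∀ i ∈ r, 0 ≤ i) (l : List Char)
    (j : Nat) (hj : j < l.length)
    (hj' : j < ((r.foldl (fun acc i => PySem.List.pySetD acc i 'X') l)).length) :
    (r.foldl (fun acc i => PySem.List.pySetD acc i 'X') l)[j] =
      if (j : Int) ∈ r then 'X' else l[j] := by
  induction r generalizing l with
  | nil => simp
  | cons i r ih =>
    have hi : 0 ≤ i := hr i (by simp)
    have hr' : ∀ x ∈ r, 0 ≤ x := fun x hx => hr x (by simp [hx])
    have hlen : (PySem.List.pySetD l i 'X').length = l.length := PySem.List.length_pySetD l i 'X'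
    simp only [List.foldl_cons]
    rw [ih hr' (PySem.List.pySetD l i 'X') (by omega)
      (by simpa [List.foldl_cons] using hj')]
    by_cases hmem : (j : Int) ∈ r
    · simp [hmem]
    · by_cases heq : (j : Int) = i
      · have hn : i.toNat = j := by omega
        simp [heq, PySem.List.pySetD_of_nonneg l 'X' hi, hn]
      · have hn : i.toNat ≠ j := by omega
        simp [hmem, heq, PySem.List.pySetD_of_nonneg l 'X' hi, hn]

-- A's append-in-a-branch fold is the map over the enumeration
lemma foldA_eq_map (l : List Char) :
    (PySem.List.enumerate l 1).foldl
      (fun acc p => if PySem.Int.mod p.1 3 = 0 then acc ++ ['X'] else acc ++ [p.2]) [] =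
    (PySem.List.enumerate l 1).map (fun p => if PySem.Int.mod p.1 3 = 0 then 'X' else p.2) := by
  have hfun : (fun (acc : List Char) (p : Int × Char) =>
        if PySem.Int.mod p.1 3 = 0 then acc ++ ['X'] else acc ++ [p.2]) =
      fun acc p => acc ++ [if PySem.Int.mod p.1 3 = 0 then 'X' else p.2] := by
    funext acc p; split <;> rfl
  rw [hfun, PySem.List.foldl_append_singleton_eq_map, List.nil_append]

theorem StringChallenge_Reverse_spec : Claim_equal_StringChallenge_Reverse := by
  intro strParam _
  unfold Spec_StringChallenge_Reverse StringChallenge_Reverse StringChallenge_Reverse_alt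
  set l : List Char := strParam.toList.reverse ++ "c2xu739".toList with hl
  apply congrArg String.ofList
  rw [foldA_eq_map l]
  have hmemr : ∀ i ∈ PySem.List.pyRange 2 (PySem.List.len l) 3, (0:Int) ≤ i := by
    intro i hi
    have := (PySem.List.mem_pyRange_iff_of_pos (a := 2) (b := PySem.List.len l) (by norm_num) i).mp hi
    omega
  apply List.ext_getElem
  · simp [length_foldl_pySetD, PySem.List.length_enumerate]
  · intro j hj hj'
    have hjl : j < l.length := by
      simpa [PySem.List.length_enumerate] using hj
    rw [List.getElem_map, PySem.List.getElem_enumerate l 1 j (by simpa [PySem.List.length_enumerate] using hjl)]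
    rw [getElem_foldl_pySetD _ hmemr l j hjl hj']
    have hcond : (PySem.Int.mod (1 + (j : Int)) 3 = 0) ↔
        ((j : Int) ∈ PySem.List.pyRange 2 (PySem.List.len l) 3) := by
      rw [PySem.Int.mod_eq_zero_iff_dvd, PySem.List.mem_pyRange_iff_of_pos (by norm_num),
        PySem.List.len_eq]
      constructor
      · intro h
        exact ⟨by omega, by exact_mod_cast hjl, by omega⟩
      · rintro ⟨_, _, h⟩; omega
    simp only [hcond]

-- ===== VERDICT (by name: the statement is the Claim_ definition above) =====
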